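-- pv_equiv track=rewrite | github.com/jokh0108/problem_solving | practice/baekjoon/baekjoon-1495.py | solution
-- ===== SOURCE A (Python) =====
-- def solution(start, max_limit, volumes):
--     volume_set = set([start])
--     for volume in volumes:
--         new_set = set()
--         while volume_set:
--             cur_volume = volume_set.pop()
--             lower_volume, upper_volume = cur_volume - volume, cur_volume + volume
--             if lower_volume >= 0:
--                 new_set.add(lower_volume)
--             if upper_volume <= max_limit:
--                 new_set.add(upper_volume)
--         volume_set = new_set.copy()
--
--     if not volume_set:
--         return -1
--     return max(volume_set)
-- ===== SOURCE B (Python) =====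
-- def solution(start, max_limit, volumes):
--     memo = {}
--
--     def rec(i, vol):
--         if i == len(volumes):
--             return vol
--         key = (i, vol)
--         if key in memo:
--             return memo[key]
--         best = None
--         lo = vol - volumes[i]
--         if lo >= 0:
--             r = rec(i + 1, lo)
--             if r is not None and (best is None or r > best):
--                 best = r
--         hi = vol + volumes[i]
--         if hi <= max_limit:
--             r = rec(i + 1, hi)
--             if r is not None and (best is None or r > best):
--                 best = r
--         memo[key] = best
--         return best
--
--     res = rec(0, start)
--     return -1 if res is None else res
-- ===== Notes on version B (the rewrite author's own statement) =====
-- stated objective: alternative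
-- what changed: Replaces the iterative frontier-set expansion (rebuilding a set of reachable volumes per song) with top-down recursion over (song_index, current_volume) memoized in a dict, returning the best final volume (None if unreachable) and -1 at the top level.
import Mathlib
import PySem

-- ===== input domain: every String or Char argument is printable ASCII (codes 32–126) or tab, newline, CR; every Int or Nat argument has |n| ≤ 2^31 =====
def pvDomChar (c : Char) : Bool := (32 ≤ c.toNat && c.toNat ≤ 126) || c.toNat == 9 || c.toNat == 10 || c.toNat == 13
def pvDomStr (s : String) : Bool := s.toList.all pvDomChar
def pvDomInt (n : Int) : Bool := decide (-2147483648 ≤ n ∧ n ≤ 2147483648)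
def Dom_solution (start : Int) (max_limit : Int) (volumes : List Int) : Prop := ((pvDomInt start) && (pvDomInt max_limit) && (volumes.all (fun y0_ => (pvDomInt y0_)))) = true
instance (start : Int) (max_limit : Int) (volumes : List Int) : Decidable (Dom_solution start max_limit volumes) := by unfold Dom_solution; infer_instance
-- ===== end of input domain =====

-- B replaces A's per-song frontier-set expansion by memoized top-down recursion on
-- (song index, current volume); same values, a different decomposition (objective: alternative).

-- ===== PORT A =====
-- The while/pop loop consumes the set in unspecified hash order; its result is another
-- set, which is order-independent, so it is ported as a fold over the set's elements.
def solution (start : Int) (max_limit : Int) (volumes : List Int) : Int :=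
  let volume_set : PySem.Set Int := PySem.Set.ofList [start]
  let final : PySem.Set Int := volumes.foldl (fun volume_set volume =>
      volume_set.foldl (fun new_set cur_volume =>
        let lower_volume := cur_volume - volume
        let upper_volume := cur_volume + volume
        let new_set := if lower_volume ≥ 0 then PySem.Set.add new_set lower_volume else new_set
        if upper_volume ≤ max_limit then PySem.Set.add new_set upper_volume else new_set)
        PySem.Set.empty) volume_set
  match PySem.List.max? final (fun x => x) with
  | none => -1
  | some m => m

-- ===== PORT B =====
-- 'if r is not None and (best is None or r > best): best = r'
def pyBetter (best r : Option Int) : Option Int :=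
  match r with
  | none => best
  | some x =>
    match best with
    | none => some x
    | some b => if x > b then some x else some b

-- rec(i, vol) with the memo dict threaded through; recursion is on the remaining
-- suffix of volumes (rest = volumes[i:]), with i carried for the memo keys.
def recB (max_limit : Int) (i : Int) (vol : Int) (rest : List Int)
    (memo : PySem.Dict (Int × Int) (Option Int)) :
    Option Int × PySem.Dict (Int × Int) (Option Int) :=
  match rest with
  | [] => (some vol, memo)
  | v :: rest' =>
    match memo.get? (i, vol) with
    | some r => (r, memo)
    | none =>
      let lo := vol - v
      let (best, memo) :=
        if lo ≥ 0 then
          let (r, memo) := recB max_limit (i + 1) lo rest' memo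
          (pyBetter none r, memo)
        else (none, memo)
      let hi := vol + v
      let (best, memo) :=
        if hi ≤ max_limit then
          let (r, memo) := recB max_limit (i + 1) hi rest' memo
          (pyBetter best r, memo)
        else (best, memo)
      (best, memo.insert (i, vol) best)

def solution_alt (start : Int) (max_limit : Int) (volumes : List Int) : Int :=
  match (recB max_limit 0 start volumes PySem.Dict.empty).1 with
  | none => -1
  | some r => r

-- ===== PRECONDITION & SPEC =====
def Spec_solution (start : Int) (max_limit : Int) (volumes : List Int) (out : Int) : Prop := out = solution_alt start max_limit volumes
instance (start : Int) (max_limit : Int) (volumes : List Int) (out : Int) : Decidable (Spec_solution start max_limit volumes out) := by unfold Spec_solution; infer_instance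

-- ===== CLAIM (what is proved, stated in full; the proofs are below) =====
def Claim_equal_solution : Prop := ∀ (start : Int) (max_limit : Int) (volumes : List Int), Dom_solution start max_limit volumes → Spec_solution start max_limit volumes (solution start max_limit volumes)

-- ===== LEMMAS AND PROOFS =====

-- Pure specification of the recursion: best final volume, none = unreachable.
def P (max_limit : Int) : List Int → Int → Option Int
  | [], vol => some vol
  | v :: rest, vol =>
    pyBetter (if vol - v ≥ 0 then P max_limit rest (vol - v) else none)
             (if vol + v ≤ max_limit then P max_limit rest (vol + v) else none)

theorem pyBetter_none_left (r : Option Int) : pyBetter none r = r := by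
  cases r <;> rfl

theorem pyBetter_none_right (a : Option Int) : pyBetter a none = a := rfl

theorem pyBetter_some_some (a b : Int) : pyBetter (some a) (some b) = some (max a b) := by
  simp only [pyBetter]
  split_ifs with h
  · exact congrArg some (max_eq_right h.le).symm
  · exact congrArg some (max_eq_left (by omega)).symm

theorem pyBetter_comm (a b : Option Int) : pyBetter a b = pyBetter b a := by
  cases a <;> cases b <;>
    simp only [pyBetter_none_left, pyBetter_none_right, pyBetter_some_some, max_comm]

theorem pyBetter_assoc (a b c : Option Int) :
    pyBetter (pyBetter a b) c = pyBetter a (pyBetter b c) := by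
  cases a <;> cases b <;> cases c <;>
    simp only [pyBetter_none_left, pyBetter_none_right, pyBetter_some_some, max_assoc]

theorem pyBetter_idem (a : Option Int) : pyBetter a a = a := by
  cases a <;> simp [pyBetter]

-- sup of P over a list of current volumes
def supP (max_limit : Int) (vols : List Int) (L : List Int) : Option Int :=
  L.foldl (fun acc s => pyBetter acc (P max_limit vols s)) none

theorem foldl_pyBetter_init (f : Int → Option Int) (L : List Int) (a : Option Int) :
    L.foldl (fun acc s => pyBetter acc (f s)) a
      = pyBetter a (L.foldl (fun acc s => pyBetter acc (f s)) none) := by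
  induction L generalizing a with
  | nil => simp [List.foldl, pyBetter]
  | cons x t ih =>
    simp only [List.foldl]
    rw [ih (pyBetter a (f x)), ih (pyBetter none (f x))]
    rw [pyBetter_none_left, pyBetter_assoc]

theorem supP_append (max_limit : Int) (vols L M : List Int) :
    supP max_limit vols (L ++ M) = pyBetter (supP max_limit vols L) (supP max_limit vols M) := by
  simp only [supP, List.foldl_append]
  rw [foldl_pyBetter_init]

theorem supP_absorb_mem (max_limit : Int) (vols : List Int) {x : Int} {L : List Int}
    (hx : x ∈ L) : pyBetter (supP max_limit vols L) (P max_limit vols x) = supP max_limit vols L := by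
  induction L with
  | nil => cases hx
  | cons y t ih =>
    have hhead : supP max_limit vols (y :: t)
        = pyBetter (P max_limit vols y) (supP max_limit vols t) := by
      simp only [supP, List.foldl]
      rw [foldl_pyBetter_init, pyBetter_none_left]
    rcases List.mem_cons.mp hx with h | h
    · subst h
      rw [hhead, pyBetter_assoc, pyBetter_comm (supP max_limit vols t), ← pyBetter_assoc,
        pyBetter_idem, ← hhead]
    · rw [hhead, pyBetter_assoc, ih h, ← hhead]

theorem supP_add (max_limit : Int) (vols : List Int) (L : List Int) (x : Int) :
    supP max_limit vols (PySem.Set.add L x) = pyBetter (supP max_limit vols L) (P max_limit vols x) := by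
  by_cases hmem : x ∈ L
  · simp [PySem.Set.add, PySem.Set.contains, hmem, supP_absorb_mem max_limit vols hmem]
  · have : PySem.Set.add L x = L ++ [x] := by
      simp [PySem.Set.add, PySem.Set.contains, hmem]
    rw [this, supP_append]
    simp [supP, List.foldl, pyBetter_none_left]

theorem supP_stepA_gen (max_limit v : Int) (vols : List Int) (S : List Int) (ns : List Int) :
    supP max_limit vols (S.foldl (fun new_set cur_volume =>
        let lower_volume := cur_volume - v
        let upper_volume := cur_volume + v
        let new_set := if lower_volume ≥ 0 then PySem.Set.add new_set lower_volume else new_set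
        if upper_volume ≤ max_limit then PySem.Set.add new_set upper_volume else new_set) ns)
      = pyBetter (supP max_limit vols ns) (supP max_limit (v :: vols) S) := by
  induction S generalizing ns with
  | nil =>
    simp [supP, List.foldl, pyBetter]
  | cons s t ih =>
    simp only [List.foldl]
    rw [ih]
    have hone : supP max_limit vols
        (if s + v ≤ max_limit then
          PySem.Set.add (if s - v ≥ 0 then PySem.Set.add ns (s - v) else ns) (s + v)
         else (if s - v ≥ 0 then PySem.Set.add ns (s - v) else ns))
        = pyBetter (supP max_limit vols ns) (P max_limit (v :: vols) s) := by
      simp only [P]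
      split_ifs <;>
        simp only [supP_add, pyBetter_assoc, pyBetter_none_left, pyBetter_none_right]
    rw [hone]
    have htail : supP max_limit (v :: vols) (s :: t)
        = pyBetter (P max_limit (v :: vols) s) (supP max_limit (v :: vols) t) := by
      simp only [supP, List.foldl]
      rw [foldl_pyBetter_init, pyBetter_none_left]
    rw [htail, pyBetter_assoc]

-- A's full fold computes supP over the processed songs
theorem supP_foldA (max_limit : Int) (vols : List Int) (S : List Int) :
    supP max_limit [] (vols.foldl (fun volume_set volume =>
        volume_set.foldl (fun new_set cur_volume =>
          let lower_volume := cur_volume - volume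
          let upper_volume := cur_volume + volume
          let new_set := if lower_volume ≥ 0 then PySem.Set.add new_set lower_volume else new_set
          if upper_volume ≤ max_limit then PySem.Set.add new_set upper_volume else new_set)
          PySem.Set.empty) S)
      = supP max_limit vols S := by
  induction vols generalizing S with
  | nil => rfl
  | cons v t ih =>
    simp only [List.foldl]
    rw [ih]
    have := supP_stepA_gen max_limit v t S PySem.Set.empty
    simpa [supP, PySem.Set.empty, List.foldl, pyBetter_none_left] using this

-- max over a nonempty plain list equals supP with no songs left
theorem foldl_pyBetter_some (t : List Int) : ∀ x : Int,
    t.foldl (fun acc s => pyBetter acc (some s)) (some x) = some (t.foldl max x) := by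
  induction t with
  | nil => intro x; rfl
  | cons y s ih =>
    intro x
    simp only [List.foldl, pyBetter_some_some]
    exact ih (max x y)

theorem supP_nil_eq_max (max_limit : Int) (L : List Int) :
    supP max_limit [] L = PySem.List.max? L (fun x => x) := by
  cases L with
  | nil => rfl
  | cons x t =>
    rw [PySem.List.max?_id_cons]
    simp only [supP, P, List.foldl, pyBetter_none_left]
    exact foldl_pyBetter_some t x

-- memo correctness: every stored entry agrees with P on the corresponding suffix
def GoodMemo (max_limit : Int) (volumes : List Int)
    (memo : PySem.Dict (Int × Int) (Option Int)) : Prop :=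
  ∀ p r, memo.get? p = some r → r = P max_limit (volumes.drop p.1.toNat) p.2

theorem recB_spec (max_limit : Int) (volumes : List Int) :
    ∀ (rest : List Int) (i : Int) (vol : Int) memo, 0 ≤ i →
      rest = volumes.drop i.toNat → GoodMemo max_limit volumes memo →
      (recB max_limit i vol rest memo).1 = P max_limit rest vol ∧
        GoodMemo max_limit volumes (recB max_limit i vol rest memo).2 := by
  intro rest
  induction rest with
  | nil =>
    intro i vol memo _ _ hg
    exact ⟨rfl, hg⟩
  | cons v rest' ih =>
    intro i vol memo hi hdrop hg
    have hdrop' : rest' = volumes.drop (i + 1).toNat := by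
      have h1 : (i + 1).toNat = i.toNat + 1 := by omega
      rw [h1, ← List.drop_drop, ← hdrop]
      rfl
    simp only [recB]
    cases hmemo : memo.get? (i, vol) with
    | some r =>
      simp only
      have := hg (i, vol) r hmemo
      rw [← hdrop] at this
      exact ⟨this, hg⟩
    | none =>
      simp only
      by_cases hlo : vol - v ≥ 0
      · have hlo' : v ≤ vol := by omega
        obtain ⟨hv1, hg1⟩ := ih (i + 1) (vol - v) memo (by omega) hdrop' hg
        by_cases hhi : vol + v ≤ max_limit
        · obtain ⟨hv2, hg2⟩ := ih (i + 1) (vol + v)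
            (recB max_limit (i + 1) (vol - v) rest' memo).2 (by omega) hdrop' hg1
          simp only [hlo, hhi, if_pos]
          constructor
          · simp [P, hlo', hhi, hv1, hv2, pyBetter_none_left]
          · intro p r hp
            rw [PySem.Dict.get?_insert] at hp
            split_ifs at hp with hk
            · subst hk
              simp only [Option.some.injEq] at hp
              rw [← hdrop, ← hp]
              simp [P, hlo', hhi, hv1, hv2, pyBetter_none_left]
            · exact hg2 p r hp
        · simp only [hlo, if_pos, hhi, if_neg, not_false_iff]
          constructor
          · simp [P, hlo', hhi, hv1, pyBetter_none_left, pyBetter_none_right]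
          · intro p r hp
            rw [PySem.Dict.get?_insert] at hp
            split_ifs at hp with hk
            · subst hk
              simp only [Option.some.injEq] at hp
              rw [← hdrop, ← hp]
              simp [P, hlo', hhi, hv1, pyBetter_none_left, pyBetter_none_right]
            · exact hg1 p r hp
      · have hlo' : ¬ v ≤ vol := by omega
        by_cases hhi : vol + v ≤ max_limit
        · obtain ⟨hv2, hg2⟩ := ih (i + 1) (vol + v) memo (by omega) hdrop' hg
          simp only [hlo, if_neg, not_false_iff, hhi, if_pos]
          constructor
          · simp [P, hlo', hhi, hv2, pyBetter_none_left]
          · intro p r hp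
            rw [PySem.Dict.get?_insert] at hp
            split_ifs at hp with hk
            · subst hk
              simp only [Option.some.injEq] at hp
              rw [← hdrop, ← hp]
              simp [P, hlo', hhi, hv2, pyBetter_none_left]
            · exact hg2 p r hp
        · simp only [hlo, hhi, if_neg, not_false_iff]
          constructor
          · simp [P, hlo', hhi, pyBetter]
          · intro p r hp
            rw [PySem.Dict.get?_insert] at hp
            split_ifs at hp with hk
            · subst hk
              simp only [Option.some.injEq] at hp
              rw [← hdrop, ← hp]
              simp [P, hlo', hhi, pyBetter]
            · exact hg p r hp

theorem solution_alt_eq_P (start max_limit : Int) (volumes : List Int) :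
    solution_alt start max_limit volumes
      = match P max_limit volumes start with
        | none => -1
        | some r => r := by
  have hempty : GoodMemo max_limit volumes PySem.Dict.empty := by
    intro p r hp
    simp [PySem.Dict.empty, PySem.Dict.get?] at hp
  obtain ⟨h, _⟩ := recB_spec max_limit volumes volumes 0 start PySem.Dict.empty le_rfl rfl hempty
  simp [solution_alt, h]

theorem solution_eq_P (start max_limit : Int) (volumes : List Int) :
    solution start max_limit volumes
      = match P max_limit volumes start with
        | none => -1
        | some r => r := by
  simp only [solution]
  rw [← supP_nil_eq_max, supP_foldA]
  have hsingle : PySem.Set.ofList [start] = [start] := rfl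
  rw [hsingle]
  simp [supP, List.foldl, pyBetter_none_left]

-- ===== VERDICT (by name: the statement is the Claim_ definition above) =====
theorem solution_spec : Claim_equal_solution := by
  intro start max_limit volumes _
  unfold Spec_solution
  rw [solution_eq_P, solution_alt_eq_P]
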